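-- pv_equiv track=rewrite | github.com/slang5/UnPeuDeTout | EX5.py | BuyAndHold
-- ===== SOURCE A (Python) =====
-- def BuyAndHold(RowMatrix):
--     Matrice = RowMatrix
--     countUp = 0
--     countDown = 0
--     for i in Matrice:
--         if i == 1:
--             countUp += 1
--         else:
--             countDown += 1
--     Profit = countUp - countDown
--     return Profit
-- ===== SOURCE B (Python) =====
-- def BuyAndHold(RowMatrix):
--     # Divide-and-conquer: the profit of an index range is the sum of the
--     # profits of its two halves; a single element contributes +1 if it is
--     # 1 and -1 otherwise.
--     def go(lo, hi):
--         if lo >= hi: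
--             return 0
--         if hi - lo == 1:
--             return 1 if RowMatrix[lo] == 1 else -1
--         mid = (lo + hi) // 2
--         return go(lo, mid) + go(mid, hi)
--     return go(0, len(RowMatrix))
-- ===== Notes on version B (the rewrite author's own statement) =====
-- stated objective: alternative
-- what changed: Replaced the linear two-counter if/else loop by a divide-and-conquer recursion over index ranges that sums +1/-1 contributions of the two halves, exploiting that profit is additive over any split of the list.
import Mathlib
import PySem

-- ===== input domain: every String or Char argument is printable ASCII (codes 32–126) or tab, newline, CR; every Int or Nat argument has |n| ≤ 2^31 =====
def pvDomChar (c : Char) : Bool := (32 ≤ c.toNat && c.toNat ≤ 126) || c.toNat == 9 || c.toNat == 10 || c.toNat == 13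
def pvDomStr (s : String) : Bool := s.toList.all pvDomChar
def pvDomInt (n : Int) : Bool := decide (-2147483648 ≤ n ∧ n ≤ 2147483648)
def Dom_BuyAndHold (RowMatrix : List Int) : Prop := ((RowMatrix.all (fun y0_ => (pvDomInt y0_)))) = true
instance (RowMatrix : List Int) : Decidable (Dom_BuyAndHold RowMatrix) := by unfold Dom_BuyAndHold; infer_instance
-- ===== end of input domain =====

-- B replaces A's two-counter if/else loop by a divide-and-conquer recursion over index ranges summing +1/-1 contributions (alternative decomposition; return value proved equal on all inputs).


-- ===== PORT A =====
-- loop over Matrice maintaining (countUp, countDown); return countUp - countDown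
def BuyAndHold (RowMatrix : List Int) : Int :=
  let Matrice := RowMatrix
  let p := Matrice.foldl (fun (st : Int × Int) i =>
    if i == 1 then (st.1 + 1, st.2) else (st.1, st.2 + 1)) (0, 0)
  p.1 - p.2

-- ===== PORT B =====
-- inner 'go': divide-and-conquer over the index range [lo, hi)
-- (indices are nonnegative throughout, so Nat indices; RowMatrix[lo] with lo < hi ≤ len is in range, ported as getD lo 0)
def bhGo (RowMatrix : List Int) (lo hi : Nat) : Int :=
  if lo ≥ hi then 0
  else if hi - lo = 1 then (if RowMatrix.getD lo 0 == 1 then 1 else -1)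
  else bhGo RowMatrix lo ((lo + hi) / 2) + bhGo RowMatrix ((lo + hi) / 2) hi
termination_by hi - lo
decreasing_by all_goals omega

def BuyAndHold_alt (RowMatrix : List Int) : Int :=
  bhGo RowMatrix 0 RowMatrix.length

-- ===== PRECONDITION & SPEC =====
def Spec_BuyAndHold (RowMatrix : List Int) (out : Int) : Prop := out = BuyAndHold_alt RowMatrix
instance (RowMatrix : List Int) (out : Int) : Decidable (Spec_BuyAndHold RowMatrix out) := by unfold Spec_BuyAndHold; infer_instance

-- ===== CLAIM (what is proved, stated in full; the proofs are below) =====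
def Claim_equal_BuyAndHold : Prop := ∀ (RowMatrix : List Int), Dom_BuyAndHold RowMatrix → Spec_BuyAndHold RowMatrix (BuyAndHold RowMatrix)

-- ===== LEMMAS AND PROOFS =====

-- bhGo computes the sum of ±1 contributions over the index range [lo, lo+n)
lemma bhGo_eq_sum (l : List Int) (n lo : Nat) :
    bhGo l lo (lo + n) =
      ((List.range' lo n).map (fun i => if l.getD i 0 == 1 then (1 : Int) else -1)).sum := by
  induction n using Nat.strong_induction_on generalizing lo with
  | _ n ih =>
    rw [bhGo]
    rcases Nat.lt_or_ge n 2 with h2 | h2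
    · interval_cases n
      · simp
      · simp [List.range']
    · have hlo : ¬ lo ≥ lo + n := by omega
      have h1 : ¬ (lo + n - lo = 1) := by omega
      rw [if_neg hlo, if_neg h1]
      set m := (lo + (lo + n)) / 2 with hm
      have hml : lo < m := by omega
      have hmh : m < lo + n := by omega
      have hA := ih (m - lo) (by omega) lo
      have hB := ih (lo + n - m) (by omega) m
      rw [show lo + (m - lo) = m by omega] at hA
      rw [show m + (lo + n - m) = lo + n by omega] at hB
      rw [hA, hB, ← List.sum_append, ← List.map_append]
      have hr := List.range'_append (s := lo) (m := m - lo) (n := lo + n - m) (step := 1)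
      rw [show lo + 1 * (m - lo) = m by omega, show m - lo + (lo + n - m) = n by omega] at hr
      rw [hr]

-- the indexed sum over the whole list is the sum of per-element contributions
lemma range_map_getD (l : List Int) (g : Int → Int) :
    (List.range' 0 l.length).map (fun i => g (l.getD i 0)) = l.map g := by
  apply List.ext_getElem
  · simp
  · intro i h1 h2
    simp at h1 ⊢
    rw [List.getElem?_eq_getElem h1]
    simp

-- A's fold accumulates (countUp, countDown) = (count of 1, rest)
lemma buyhold_fold (l : List Int) (u d : Int) :
    (l.foldl (fun (st : Int × Int) i =>
      if i == 1 then (st.1 + 1, st.2) else (st.1, st.2 + 1)) (u, d)) =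
    (u + PySem.List.count l 1, d + (l.length - PySem.List.count l 1)) := by
  induction l generalizing u d with
  | nil => simp [PySem.List.count]
  | cons x xs ih =>
      by_cases h : x = 1
      · subst h
        rw [List.foldl_cons, if_pos (by decide), ih]
        simp [PySem.List.count, Prod.ext_iff]
        ring
      · rw [List.foldl_cons, if_neg (by simpa using h), ih]
        simp [PySem.List.count, h, Prod.ext_iff]
        ring

-- per-element ±1 sum equals 2*count(1) - len
lemma sum_pm_eq (l : List Int) :
    (l.map (fun x => if x == 1 then (1 : Int) else -1)).sum =
      2 * PySem.List.count l 1 - l.length := by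
  induction l with
  | nil => simp [PySem.List.count]
  | cons x xs ih =>
      simp only [PySem.List.count] at ih ⊢
      by_cases h : x = 1
      · subst h
        rw [List.map_cons, List.sum_cons, ih, List.count_cons_self, List.length_cons]
        simp; ring
      · rw [List.map_cons, List.sum_cons, ih,
          List.count_cons_of_ne h, List.length_cons]
        simp [h]; ring

-- ===== VERDICT (by name: the statement is the Claim_ definition above) =====
theorem BuyAndHold_spec : Claim_equal_BuyAndHold := by
  intro l _
  unfold Spec_BuyAndHold BuyAndHold BuyAndHold_alt
  simp only []
  rw [buyhold_fold]
  have hb : bhGo l 0 l.length =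
      (l.map (fun x => if x == 1 then (1 : Int) else -1)).sum := by
    have := bhGo_eq_sum l l.length 0
    simp only [Nat.zero_add] at this
    rw [this, range_map_getD l (fun x => if x == 1 then (1 : Int) else -1)]
  rw [hb, sum_pm_eq]
  push_cast
  ring
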